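-- pv_equiv track=rewrite | github.com/418704194/Course | message-in-DNA/1_3_9 (2).py | SymbolArray
-- ===== SOURCE A (Python) =====
-- def PatternCount(Pattern, Text):
--     count = 0
--     for i in range(len(Text)-len(Pattern)+1):
--         if Text[i:i+len(Pattern)] == Pattern:
--             count = count+1
--     return count
--
-- def SymbolArray(Genome, symbol):
--     array = {}
--     n = len(Genome)
--     Genome = Genome + Genome[0:n//2]
--     count = PatternCount(symbol,Genome[0:n//2])
--     array[0] = count
--     for i in range(1,n):
--         if Genome[(i-1):(i-1+len(symbol))] == symbol:
--             count = count - 1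
--         if Genome[(i+(n//2)-len(symbol)):(i+(n//2))] == symbol:
--             count = count + 1
--         array[i] = count
--     return array
-- ===== SOURCE B (Python) =====
-- def SymbolArray(Genome, symbol):
--     n = len(Genome)
--     h = n // 2
--     ExtendedGenome = Genome + Genome[:h]
--
--     def count(text):
--         # overlapping occurrences of symbol in text
--         return sum(1 for j in range(len(text) - len(symbol) + 1)
--                    if text[j:j+len(symbol)] == symbol)
--
--     array = {0: count(ExtendedGenome[:h])}
--     for i in range(1, n):
--         array[i] = (count(ExtendedGenome[:i+h])
--                     - count(ExtendedGenome[:i+len(symbol)-1]))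
--     return array
-- ===== Notes on version B (the rewrite author's own statement) =====
-- stated objective: alternative
-- what changed: B computes each dictionary entry independently in closed form as a difference of two prefix occurrence counts over the extended genome (count(eg[:i+n//2]) - count(eg[:i+len(symbol)-1])), instead of A's stateful running count updated by boundary add/remove tests at each step.
import Mathlib
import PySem

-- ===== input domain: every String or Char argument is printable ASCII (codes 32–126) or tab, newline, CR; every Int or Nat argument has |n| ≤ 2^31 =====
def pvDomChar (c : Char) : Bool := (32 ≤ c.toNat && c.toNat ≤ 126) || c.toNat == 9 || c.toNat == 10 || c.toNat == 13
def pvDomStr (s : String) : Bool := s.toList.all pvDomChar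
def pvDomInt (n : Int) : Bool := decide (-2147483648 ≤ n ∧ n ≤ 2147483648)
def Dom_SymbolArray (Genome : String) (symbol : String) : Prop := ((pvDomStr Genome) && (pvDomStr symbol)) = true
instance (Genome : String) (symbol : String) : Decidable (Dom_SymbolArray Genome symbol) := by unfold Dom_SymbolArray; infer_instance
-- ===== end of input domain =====

-- B computes each entry in closed form as a difference of two prefix occurrence counts,
-- instead of A's stateful running count (objective: alternative; not faster).
-- The Python dict has the fresh integer keys 0..n-1 inserted in increasing order, so it is ported
-- as an association list built by appending one pair per loop iteration.

-- ===== PORT A =====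
def pvPatternCount (Pattern Text : List Char) : Int :=
  (PySem.List.pyRange 0 ((Text.length : Int) - (Pattern.length : Int) + 1) 1).foldl
    (fun count i =>
      if PySem.List.slice Text (some i) (some (i + (Pattern.length : Int))) = Pattern then count + 1
      else count) 0

def SymbolArray (Genome : String) (symbol : String) : List (Int × Int) :=
  let g := Genome.toList
  let s := symbol.toList
  let n : Int := g.length
  -- Genome = Genome + Genome[0:n//2]
  let g2 := g ++ PySem.List.slice g (some 0) (some (PySem.Int.floordiv n 2))
  let count0 := pvPatternCount s (PySem.List.slice g2 (some 0) (some (PySem.Int.floordiv n 2)))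
  let res := (PySem.List.pyRange 1 n 1).foldl
    (fun (st : List (Int × Int) × Int) i =>
      let c1 := if PySem.List.slice g2 (some (i - 1)) (some (i - 1 + (s.length : Int))) = s
                then st.2 - 1 else st.2
      let c2 := if PySem.List.slice g2 (some (i + PySem.Int.floordiv n 2 - (s.length : Int)))
                                        (some (i + PySem.Int.floordiv n 2)) = s
                then c1 + 1 else c1
      (st.1 ++ [(i, c2)], c2))
    ([((0 : Int), count0)], count0)
  res.1

-- ===== PORT B =====
-- count(text): sum(1 for j in range(len(text)-len(symbol)+1) if text[j:j+len(symbol)] == symbol)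
def pvCountB (symbol text : List Char) : Int :=
  ((PySem.List.pyRange 0 ((text.length : Int) - (symbol.length : Int) + 1) 1).map
    (fun j => if PySem.List.slice text (some j) (some (j + (symbol.length : Int))) = symbol
              then (1 : Int) else 0)).sum

def SymbolArray_alt (Genome : String) (symbol : String) : List (Int × Int) :=
  let g := Genome.toList
  let s := symbol.toList
  let n : Int := g.length
  let h := PySem.Int.floordiv n 2
  let ext := g ++ PySem.List.slice g none (some h)
  (PySem.List.pyRange 1 n 1).foldl
    (fun arr i =>
      arr ++ [(i, pvCountB s (PySem.List.slice ext none (some (i + h)))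
                    - pvCountB s (PySem.List.slice ext none (some (i + (s.length : Int) - 1))))])
    [((0 : Int), pvCountB s (PySem.List.slice ext none (some h)))]

-- ===== PRECONDITION & SPEC =====
def Spec_SymbolArray (Genome : String) (symbol : String) (out : List (Int × Int)) : Prop :=
  out = SymbolArray_alt Genome symbol
instance (Genome : String) (symbol : String) (out : List (Int × Int)) :
    Decidable (Spec_SymbolArray Genome symbol out) := by unfold Spec_SymbolArray; infer_instance

-- ===== CLAIM (what is proved, stated in full; the proofs are below) =====
def Claim_equal_SymbolArray : Prop := ∀ (Genome : String) (symbol : String),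
  Dom_SymbolArray Genome symbol → Spec_SymbolArray Genome symbol (SymbolArray Genome symbol)

-- ===== LEMMAS AND PROOFS =====
def pvCnt (s w : List Char) : Int :=
  ((List.range (w.length + 1 - s.length)).countP
    (fun j => decide ((w.drop j).take s.length = s)) : Int)

theorem pvCnt_of_short (s w : List Char) (hlen : w.length < s.length) : pvCnt s w = 0 := by
  unfold pvCnt
  have : w.length + 1 - s.length = 0 := by omega
  simp [this]

theorem pvCnt_snoc (s w : List Char) (c : Char) :
    pvCnt s (w ++ [c]) =
      pvCnt s w + (if ((w ++ [c]).drop (w.length + 1 - s.length)).take s.length = s then 1 else 0) := by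
  unfold pvCnt
  by_cases hL : s.length ≤ w.length + 1
  · have hlen : (w ++ [c]).length + 1 - s.length = (w.length + 1 - s.length) + 1 := by
      simp; omega
    rw [hlen, List.range_succ, List.countP_append]
    have hpred : (List.range (w.length + 1 - s.length)).countP
          (fun j => decide (((w ++ [c]).drop j).take s.length = s))
        = (List.range (w.length + 1 - s.length)).countP
            (fun j => decide ((w.drop j).take s.length = s)) := by
      apply List.countP_congr
      intro j hj
      rw [List.mem_range] at hj
      have hjw : j ≤ w.length := by omega
      rw [List.drop_append_of_le_length hjw,
          List.take_append_of_le_length (by simp [List.length_drop]; omega)]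
    rw [hpred]
    by_cases hc : ((w ++ [c]).drop (w.length + 1 - s.length)).take s.length = s <;>
      simp [hc] <;> push_cast <;> ring
  · have h1 : (w ++ [c]).length + 1 - s.length = 0 := by simp; omega
    have h2 : w.length + 1 - s.length = 0 := by omega
    have hc : ¬ (((w ++ [c]).drop (w.length + 1 - s.length)).take s.length = s) := by
      rw [h2]
      intro h
      have := congrArg List.length h
      simp at this
      omega
    have h3 : w.length + 1 + 1 - s.length = 0 := by omega
    rw [h2] at hc
    simp only [List.drop_zero] at hc
    simp [h3, h2, hc]

theorem pvFoldCount {α : Type} (p : α → Prop) [DecidablePred p] :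
    ∀ (l : List α) (c : Int),
      l.foldl (fun c i => if p i then c + 1 else c) c = c + (l.countP (fun i => decide (p i)) : Int) := by
  intro l
  induction l with
  | nil => simp
  | cons x xs ih =>
    intro c
    by_cases hx : p x <;> simp [List.foldl_cons, hx, ih, List.countP_cons] <;> push_cast <;> ring

theorem pvPatternCount_eq (s w : List Char) : pvPatternCount s w = pvCnt s w := by
  unfold pvPatternCount pvCnt
  rw [PySem.List.pyRange_one]
  have hb : ((w.length : Int) - (s.length : Int) + 1 - 0).toNat = w.length + 1 - s.length := by omega
  rw [hb, List.foldl_map, pvFoldCount]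
  simp only [zero_add, PySem.List.slice_natCast_add]

theorem pvSumIte {α : Type} (p : α → Prop) [DecidablePred p] :
    ∀ (l : List α),
      (l.map (fun x => if p x then (1 : Int) else 0)).sum = (l.countP (fun x => decide (p x)) : Int) := by
  intro l
  induction l with
  | nil => simp
  | cons x xs ih =>
    by_cases hx : p x <;> simp [hx, ih, List.countP_cons] <;> push_cast <;> ring

theorem pvCountB_eq (s w : List Char) : pvCountB s w = pvCnt s w := by
  unfold pvCountB pvCnt
  rw [PySem.List.pyRange_one]
  have hb : ((w.length : Int) - (s.length : Int) + 1 - 0).toNat = w.length + 1 - s.length := by omega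
  rw [hb, List.map_map]
  simp only [Function.comp_def, zero_add, PySem.List.slice_natCast_add]
  rw [pvSumIte]

theorem pvFoldB {α : Type} (f : α → Int × Int) :
    ∀ (l : List α) (init : List (Int × Int)),
      l.foldl (fun arr i => arr ++ [f i]) init = init ++ l.map f := by
  intro l
  induction l with
  | nil => simp
  | cons x xs ih => intro init; simp [List.foldl_cons, ih]

theorem pvFloordiv (n : Nat) : PySem.Int.floordiv (n : Int) 2 = ((n / 2 : Nat) : Int) := by
  exact_mod_cast PySem.Int.floordiv_natCast n 2

theorem pvWin_back (s l : List Char) (m : Nat) (hlen : m + 1 ≤ l.length) :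
    pvCnt s (l.take (m + 1)) =
      pvCnt s (l.take m) +
        (if ((l.take (m + 1)).drop (m + 1 - s.length)).take s.length = s then 1 else 0) := by
  have hm : m < l.length := by omega
  have h1 : l.take (m + 1) = l.take m ++ [l[m]] := by
    rw [List.take_succ, List.getElem?_eq_getElem hm]
    rfl
  rw [h1, pvCnt_snoc]
  have hlt : (l.take m).length = m := by
    rw [List.length_take, Nat.min_eq_left (by omega)]
  rw [hlt, ← h1]

def pvU (s eg : List Char) (h : Nat) (c i : Int) : Int :=
  if PySem.List.slice eg (some (i + (h : Int) - (s.length : Int))) (some (i + (h : Int))) = s then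
    (if PySem.List.slice eg (some (i - 1)) (some (i - 1 + (s.length : Int))) = s then c - 1 else c) + 1
  else
    (if PySem.List.slice eg (some (i - 1)) (some (i - 1 + (s.length : Int))) = s then c - 1 else c)

theorem pvU_fold (s eg : List Char) (h : Nat) (c i : Int) :
    (if PySem.List.slice eg (some (i + (h : Int) - (s.length : Int))) (some (i + (h : Int))) = s then
      (if PySem.List.slice eg (some (i - 1)) (some (i - 1 + (s.length : Int))) = s then c - 1 else c) + 1
    else
      (if PySem.List.slice eg (some (i - 1)) (some (i - 1 + (s.length : Int))) = s then c - 1 else c))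
    = pvU s eg h c i := rfl

theorem pvFoldA (u : Int → Int → Int) (V : Nat → Int) (N : Nat)
    (hu : ∀ a : Nat, 1 ≤ a → a < N → u (V (a - 1)) ((a : Nat) : Int) = V a) :
    ∀ (m a : Nat), a + m = N → 1 ≤ a → ∀ (lst : List (Int × Int)),
      ((List.range m).map (fun k : Nat => ((a + k : Nat) : Int))).foldl
        (fun (st : List (Int × Int) × Int) i => (st.1 ++ [(i, u st.2 i)], u st.2 i))
        (lst, V (a - 1))
      = (lst ++ (List.range m).map (fun k : Nat => (((a + k : Nat) : Int), V (a + k))), V (N - 1)) := by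
  intro m
  induction m with
  | zero =>
    intro a hN ha lst
    have : a - 1 = N - 1 := by omega
    simp [this]
  | succ m ih =>
    intro a hN ha lst
    rw [List.range_succ_eq_map, List.map_cons, List.map_cons, List.foldl_cons,
        List.map_map, List.map_map]
    have ha' : a < N := by omega
    have hstep : u (V (a - 1)) ((a + 0 : Nat) : Int) = V a := by
      simpa using hu a ha ha'
    have hfun : ((fun k : Nat => ((a + k : Nat) : Int)) ∘ Nat.succ)
        = (fun k : Nat => (((a + 1) + k : Nat) : Int)) := by
      funext k
      simp [Function.comp, Nat.succ_eq_add_one]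
      omega
    have hV : V a = V ((a + 1) - 1) := by simp
    rw [hfun, hstep, hV,
        ih (a + 1) (by omega) (by omega) (lst ++ [(((a + 0 : Nat) : Int), V ((a + 1) - 1))])]
    have hfun2 : ((fun k : Nat => (((a + k : Nat) : Int), V (a + k))) ∘ Nat.succ)
        = (fun k : Nat => ((((a + 1) + k : Nat) : Int), V ((a + 1) + k))) := by
      funext k
      simp only [Function.comp, Nat.succ_eq_add_one]
      rw [show a + (k + 1) = (a + 1) + k by omega]
    rw [hfun2]
    simp

-- the value A's running count holds after step j, in closed form (prefix-count difference)
def pvV (s eg : List Char) (h L j : Nat) : Int :=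
  if j = 0 then pvCnt s (eg.take h)
  else pvCnt s (eg.take (j + h)) - pvCnt s (eg.take (j + L - 1))

theorem pvOcc_false (s eg : List Char) (p : Nat) (hp : eg.length < p + s.length)
    (hs : 1 ≤ s.length) : ¬ ((eg.drop p).take s.length = s) := by
  intro h
  have := congrArg List.length h
  simp [List.length_take, List.length_drop] at this
  omega

theorem pvPref_succ (s eg : List Char) (t : Nat) (ht : t < eg.length) (hL : s.length ≤ t + 1) :
    pvCnt s (eg.take (t + 1))
      = pvCnt s (eg.take t) + (if (eg.drop (t + 1 - s.length)).take s.length = s then 1 else 0) := by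
  rw [pvWin_back s eg t (by omega)]
  have hbr : ((eg.take (t + 1)).drop (t + 1 - s.length)).take s.length
      = (eg.drop (t + 1 - s.length)).take s.length := by
    rw [List.drop_take, show (t + 1) - (t + 1 - s.length) = s.length by omega,
        List.take_take, Nat.min_self]
  rw [hbr]

theorem pvStep (g s : List Char) (i : Nat) (h1 : 1 ≤ i) (h2 : i < g.length) :
    pvU s (g ++ g.take (g.length / 2)) (g.length / 2)
        (pvV s (g ++ g.take (g.length / 2)) (g.length / 2) s.length (i - 1)) ((i : Nat) : Int)
      = pvV s (g ++ g.take (g.length / 2)) (g.length / 2) s.length i := by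
  have hN2 : 2 ≤ g.length := by omega
  have hh1 : 1 ≤ g.length / 2 := by omega
  have hhN : g.length / 2 ≤ g.length := Nat.div_le_self _ _
  have hlen : (g ++ g.take (g.length / 2)).length = g.length + g.length / 2 := by
    rw [List.length_append, List.length_take, Nat.min_eq_left hhN]
  set eg := g ++ g.take (g.length / 2) with hegdef
  set h := g.length / 2 with hhdef
  -- the removal condition, as a drop/take occurrence test
  have hrem : PySem.List.slice eg (some ((i : Int) - 1)) (some ((i : Int) - 1 + (s.length : Int)))
      = (eg.drop (i - 1)).take s.length := by
    rw [show ((i : Int) - 1) = (((i - 1 : Nat)) : Int) by push_cast [h1]; omega]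
    exact PySem.List.slice_natCast_add eg (i - 1) s.length
  -- the addition test equals the step taken by the first prefix count
  have hAV : pvCnt s (eg.take (i + h)) = pvCnt s (eg.take (i + h - 1)) +
      (if PySem.List.slice eg (some ((i : Int) + (h : Int) - (s.length : Int)))
          (some ((i : Int) + (h : Int))) = s then 1 else 0) := by
    by_cases hq : s.length ≤ i + h
    · have hadd : PySem.List.slice eg (some ((i : Int) + (h : Int) - (s.length : Int)))
          (some ((i : Int) + (h : Int))) = (eg.drop (i + h - s.length)).take s.length := by
        rw [show ((i : Int) + (h : Int) - (s.length : Int)) = (((i + h - s.length : Nat)) : Int) by push_cast; omega,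
            show ((i : Int) + (h : Int)) = (((i + h - s.length : Nat)) : Int) + (s.length : Int) by push_cast; omega]
        exact PySem.List.slice_natCast_add eg (i + h - s.length) s.length
      rw [hadd]
      have hps := pvPref_succ s eg (i + h - 1) (by omega) (by omega)
      rw [show i + h - 1 + 1 = i + h by omega] at hps
      exact hps
    · -- s.length > i + h : the slice has a negative start and is strictly shorter than s
      have hne : ¬ (PySem.List.slice eg (some ((i : Int) + (h : Int) - (s.length : Int)))
          (some ((i : Int) + (h : Int))) = s) := by
        intro hocc
        have hk : ((i : Int) + (h : Int) - (s.length : Int)) = -(((s.length - (i + h) : Nat)) : Int) := by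
          push_cast; omega
        have hlens := congrArg List.length hocc
        rw [PySem.List.length_slice, hk,
            PySem.List.clampIdx_neg_natCast _ _ (by omega),
            show ((i : Int) + (h : Int)) = (((i + h : Nat)) : Int) by push_cast; ring,
            PySem.List.clampIdx_natCast, hlen] at hlens
        rw [Nat.min_eq_left (by omega)] at hlens
        omega
      rw [if_neg hne, pvCnt_of_short s _ (by rw [List.length_take]; omega),
          pvCnt_of_short s _ (by rw [List.length_take]; omega)]
      ring
  rcases eq_or_lt_of_le h1 with hi1 | hi2
  · -- i = 1
    rw [show i - 1 = 0 by omega] at *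
    have hRV : pvCnt s (eg.take s.length) = (if (eg.drop 0).take s.length = s then 1 else 0) := by
      by_cases hb : s.length ≤ eg.length
      · unfold pvCnt
        rw [List.length_take, Nat.min_eq_left hb, show s.length + 1 - s.length = 1 by omega,
            show List.range 1 = [0] from rfl]
        simp [List.take_take]
      · rw [List.take_of_length_le (by omega), pvCnt_of_short s _ (by omega),
            if_neg (by simpa using pvOcc_false s eg 0 (by omega) (by omega))]
    unfold pvU pvV
    rw [hrem, ← hi1]
    simp only [if_pos rfl, if_neg (by omega : ¬ (1 : Nat) = 0)]
    rw [show (1 : Nat) + s.length - 1 = s.length by omega, show (1 : Nat) + h = 1 + h from rfl]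
    have hAV1 := hAV
    rw [← hi1, show 1 + h - 1 = h by omega] at hAV1
    rw [show ((1 : Nat) : Int) = (1 : Int) from rfl] at *
    rw [hAV1, hRV]
    simp only [List.drop_zero]
    split_ifs <;> omega
  · -- i ≥ 2
    have hV1 : pvV s eg h s.length (i - 1)
        = pvCnt s (eg.take (i + h - 1)) - pvCnt s (eg.take (i + s.length - 2)) := by
      unfold pvV
      rw [if_neg (by omega : ¬ i - 1 = 0), show i - 1 + h = i + h - 1 by omega,
          show i - 1 + s.length - 1 = i + s.length - 2 by omega]
    have hV2 : pvV s eg h s.length i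
        = pvCnt s (eg.take (i + h)) - pvCnt s (eg.take (i + s.length - 1)) := by
      unfold pvV
      rw [if_neg (by omega : ¬ i = 0)]
    have hRV : pvCnt s (eg.take (i + s.length - 1)) = pvCnt s (eg.take (i + s.length - 2)) +
        (if (eg.drop (i - 1)).take s.length = s then 1 else 0) := by
      by_cases hb : i + s.length - 1 ≤ eg.length
      · have hps := pvPref_succ s eg (i + s.length - 2) (by omega) (by omega)
        rw [show i + s.length - 2 + 1 = i + s.length - 1 by omega,
            show i + s.length - 1 - s.length = i - 1 by omega] at hps
        exact hps
      · have hL1 : 1 ≤ s.length := by omega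
        rw [List.take_of_length_le (by omega), List.take_of_length_le (by omega),
            if_neg (pvOcc_false s eg (i - 1) (by omega) hL1)]
        ring
    unfold pvU
    rw [hrem, hV1, hV2, hAV, hRV]
    split_ifs <;> omega

theorem SymbolArray_eq_canon (Genome symbol : String) :
    SymbolArray Genome symbol =
      (let g := Genome.toList
       let s := symbol.toList
       let h := g.length / 2
       let L := s.length
       let eg := g ++ g.take h
       ((0 : Int), pvV s eg h L 0) ::
         (List.range (g.length - 1)).map (fun k : Nat => (((1 + k : Nat) : Int), pvV s eg h L (1 + k)))) := by
  unfold SymbolArray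
  simp only [pvFloordiv, PySem.List.slice_to_natCast, PySem.List.slice_zero_start,
    PySem.List.pyRange_one]
  have ht : (((Genome.toList.length : Int)) - 1).toNat = Genome.toList.length - 1 := by omega
  rw [ht]
  have hf : (fun k : Nat => (1 : Int) + (k : Int)) = (fun k : Nat => ((1 + k : Nat) : Int)) := by
    funext k; push_cast; ring
  rw [hf]
  simp only [pvU_fold]
  have hc0 : pvPatternCount symbol.toList
      (List.take (Genome.toList.length / 2)
        (Genome.toList ++ List.take (Genome.toList.length / 2) Genome.toList))
      = pvV symbol.toList (Genome.toList ++ List.take (Genome.toList.length / 2) Genome.toList)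
          (Genome.toList.length / 2) symbol.toList.length 0 := by
    rw [pvPatternCount_eq]; simp [pvV]
  rw [hc0]
  rcases Nat.eq_zero_or_pos Genome.toList.length with hN | hN
  · simp [hN]
  · rw [show pvV symbol.toList (Genome.toList ++ List.take (Genome.toList.length / 2) Genome.toList)
          (Genome.toList.length / 2) symbol.toList.length 0
        = pvV symbol.toList (Genome.toList ++ List.take (Genome.toList.length / 2) Genome.toList)
          (Genome.toList.length / 2) symbol.toList.length (1 - 1) from rfl]
    rw [pvFoldA
        (pvU symbol.toList (Genome.toList ++ List.take (Genome.toList.length / 2) Genome.toList)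
          (Genome.toList.length / 2))
        (pvV symbol.toList (Genome.toList ++ List.take (Genome.toList.length / 2) Genome.toList)
          (Genome.toList.length / 2) symbol.toList.length)
        Genome.toList.length
        (fun a ha haN => pvStep Genome.toList symbol.toList a ha haN)
        (Genome.toList.length - 1) 1 (by omega) (by omega)]
    simp

theorem SymbolArray_alt_eq_canon (Genome symbol : String) :
    SymbolArray_alt Genome symbol =
      (let g := Genome.toList
       let s := symbol.toList
       let h := g.length / 2
       let L := s.length
       let eg := g ++ g.take h
       ((0 : Int), pvV s eg h L 0) ::
         (List.range (g.length - 1)).map (fun k : Nat => (((1 + k : Nat) : Int), pvV s eg h L (1 + k)))) := by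
  unfold SymbolArray_alt
  simp only [pvFloordiv, PySem.List.slice_to_natCast, PySem.List.pyRange_one]
  have ht : (((Genome.toList.length : Int)) - 1).toNat = Genome.toList.length - 1 := by omega
  rw [ht]
  have hf : (fun k : Nat => (1 : Int) + (k : Int)) = (fun k : Nat => ((1 + k : Nat) : Int)) := by
    funext k; push_cast; ring
  rw [hf]
  rw [pvFoldB (fun i : Int => (i,
      pvCountB symbol.toList (PySem.List.slice
        (Genome.toList ++ List.take (Genome.toList.length / 2) Genome.toList) none
        (some (i + ((Genome.toList.length / 2 : Nat) : Int))))
      - pvCountB symbol.toList (PySem.List.slice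
        (Genome.toList ++ List.take (Genome.toList.length / 2) Genome.toList) none
        (some (i + (symbol.toList.length : Int) - 1)))))]
  rw [List.map_map]
  have hmap : ∀ eg : List Char, ((fun i : Int => (i,
      pvCountB symbol.toList (PySem.List.slice eg none (some (i + ((Genome.toList.length / 2 : Nat) : Int))))
      - pvCountB symbol.toList (PySem.List.slice eg none (some (i + (symbol.toList.length : Int) - 1)))))
        ∘ (fun k : Nat => ((1 + k : Nat) : Int)))
      = (fun k : Nat => (((1 + k : Nat) : Int),
          pvCnt symbol.toList (eg.take ((1 + k) + Genome.toList.length / 2))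
          - pvCnt symbol.toList (eg.take ((1 + k) + symbol.toList.length - 1)))) := by
    intro eg
    funext k
    simp only [Function.comp]
    rw [show (((1 + k : Nat) : Int) + ((Genome.toList.length / 2 : Nat) : Int))
          = (((1 + k) + Genome.toList.length / 2 : Nat) : Int) by push_cast; ring,
        show (((1 + k : Nat) : Int) + ((symbol.toList.length : Nat) : Int) - 1)
          = (((1 + k) + symbol.toList.length - 1 : Nat) : Int) by push_cast; omega,
        PySem.List.slice_to_natCast, PySem.List.slice_to_natCast, pvCountB_eq, pvCountB_eq]
  rw [hmap]
  have hV : ∀ eg : List Char, (fun k : Nat => (((1 + k : Nat) : Int),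
        pvCnt symbol.toList (eg.take ((1 + k) + Genome.toList.length / 2))
        - pvCnt symbol.toList (eg.take ((1 + k) + symbol.toList.length - 1))))
      = (fun k : Nat => (((1 + k : Nat) : Int),
          pvV symbol.toList eg (Genome.toList.length / 2) symbol.toList.length (1 + k))) := by
    intro eg
    funext k
    simp [pvV]
  rw [hV]
  rw [show pvCountB symbol.toList
        (List.take (Genome.toList.length / 2)
          (Genome.toList ++ List.take (Genome.toList.length / 2) Genome.toList))
      = pvV symbol.toList (Genome.toList ++ List.take (Genome.toList.length / 2) Genome.toList)
          (Genome.toList.length / 2) symbol.toList.length 0 by rw [pvCountB_eq]; simp [pvV]]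
  simp



-- ===== VERDICT (by name: the statement is the Claim_ definition above) =====
theorem SymbolArray_spec : Claim_equal_SymbolArray := by
  intro Genome symbol _
  unfold Spec_SymbolArray
  rw [SymbolArray_eq_canon Genome symbol, SymbolArray_alt_eq_canon Genome symbol]
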